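-- pv_equiv track=rewrite | github.com/junbangg/Algorithm-Study | 기출/KAKAO 2022 BLIND/파고되지않는 건물/solution.py | solution
-- ===== SOURCE A (Python) =====
-- def createPrefix(board, skills):
--     for type, r1, c1, r2, c2, degree in skills:
--         board[r1][c1] += degree if type == 2 else -degree
--         board[r1][c2+1] += -degree if type == 2 else degree
--         board[r2+1][c1] += -degree if type == 2 else degree
--         board[r2+1][c2+1] += degree if type == 2 else -degree
--     return board
--
-- def solution(board, skill):
--     # padded board
--     prefixBoard = [[0 for _ in range(len(board[0]) + 1)] for _ in range(len(board)+1)]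
--     prefixBoard = createPrefix(prefixBoard, skill)
--
--     rowCount, colCount = len(board), len(board[0])
--     # row prefix
--     for x in range(rowCount):
--         for y in range(colCount):
--             prefixBoard[x][y+1] += prefixBoard[x][y]
--     # col prefix
--     for x in range(rowCount):
--         for y in range(colCount):
--             prefixBoard[x+1][y] += prefixBoard[x][y]
--
--     # get answer
--     answer = 0
--     for x in range(rowCount):
--         for y in range(colCount):
--             board[x][y] += prefixBoard[x][y]
--             if board[x][y] >= 1:
--                 answer += 1
--     return answer
-- ===== SOURCE B (Python) =====
-- def solution(board, skill):
--     # Apply each skill directly to the rectangle it covers (mutating board in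
--     # place, as A's final pass does), then count cells that are >= 1.
--     rows, cols = len(board), len(board[0])
--     for t, r1, c1, r2, c2, degree in skill:
--         d = degree if t == 2 else -degree
--         for r in range(r1, r2 + 1):
--             row = board[r]
--             for c in range(c1, c2 + 1):
--                 row[c] += d
--     answer = 0
--     for r in range(rows):
--         row = board[r]
--         for c in range(cols):
--             if row[c] >= 1:
--                 answer += 1
--     return answer
-- ===== Notes on version B (the rewrite author's own statement) =====
-- stated objective: alternative
-- what changed: B drops the padded difference array and the two prefix-sum passes entirely: each skill adds its signed degree directly to every cell of its rectangle in the input board, and one final pass counts cells >= 1.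
-- outside the precondition, e.g. on solution([[0], [0], [0]], [[1, 2, 0, 0, 0, 5]]): A returns 1, B returns 0; on solution([[0, 0], [0, 0]], [[2, -1, 0, 0, 0, 3]]): A returns 0, B returns 2
import Mathlib
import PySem

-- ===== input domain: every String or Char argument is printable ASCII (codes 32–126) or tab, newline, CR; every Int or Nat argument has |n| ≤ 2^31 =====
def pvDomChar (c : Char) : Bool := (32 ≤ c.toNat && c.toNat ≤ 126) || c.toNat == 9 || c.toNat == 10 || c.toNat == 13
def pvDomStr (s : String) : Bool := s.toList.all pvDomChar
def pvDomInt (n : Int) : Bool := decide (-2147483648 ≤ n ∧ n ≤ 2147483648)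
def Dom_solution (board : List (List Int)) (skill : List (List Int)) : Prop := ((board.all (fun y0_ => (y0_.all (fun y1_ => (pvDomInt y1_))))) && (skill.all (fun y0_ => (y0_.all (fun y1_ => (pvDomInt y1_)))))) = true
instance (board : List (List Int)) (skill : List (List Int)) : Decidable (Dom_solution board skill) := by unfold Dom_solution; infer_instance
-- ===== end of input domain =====

-- B replaces A's padded difference array and its two prefix-sum passes by direct per-skill
-- rectangle updates followed by a single counting pass (objective: alternative decomposition).
-- Both Pythons also mutate `board` in place (and leave it with identical contents); the
-- theorems below are about the RETURN value.

-- ===== PORT A =====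
-- shared matrix helpers: mget m i j reads m[i][j] (0 default), madd is `m[i][j] += d`
def mget (m : List (List Int)) (i j : Nat) : Int := (m.getD i []).getD j 0
def madd (m : List (List Int)) (i j : Nat) (d : Int) : List (List Int) :=
  m.modify i (fun row => row.modify j (fun v => v + d))
-- Python's effective index: negative indices count from the end
def pyIx (i : Int) (n : Nat) : Int := if i < 0 then i + n else i
-- `m[i][j] += d` with Python int index semantics (negative wrap); where Python raises
-- IndexError (index still out of range) this is a no-op — those inputs are outside Pre_
def pyAdd2 (m : List (List Int)) (i j : Int) (d : Int) : List (List Int) :=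
  if 0 ≤ pyIx i m.length ∧ pyIx i m.length < (m.length : Int) then
    m.modify (pyIx i m.length).toNat (fun row =>
      if 0 ≤ pyIx j row.length ∧ pyIx j row.length < (row.length : Int) then
        row.modify (pyIx j row.length).toNat (fun v => v + d)
      else row)
  else m

def createPrefix (board : List (List Int)) (skills : List (List Int)) : List (List Int) :=
  skills.foldl (fun m s =>
    match s with
    | [t, r1, c1, r2, c2, degree] =>
        let d := if t == 2 then degree else -degree
        pyAdd2 (pyAdd2 (pyAdd2 (pyAdd2 m r1 c1 d) r1 (c2 + 1) (-d)) (r2 + 1) c1 (-d)) (r2 + 1) (c2 + 1) d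
    | _ => m) board   -- Python raises on a skill that does not unpack into 6 values (excluded by Pre_)

def solution (board : List (List Int)) (skill : List (List Int)) : Int :=
  let rowCount := board.length
  let colCount := (PySem.List.pyGetD board 0 []).length   -- len(board[0]); raises on [] (excluded by Pre_)
  -- `range(n)` loops over nonnegative indices, kept as List.range over Nat
  let p1 := createPrefix ((List.range (rowCount + 1)).map
      (fun _ => (List.range (colCount + 1)).map (fun _ => (0 : Int)))) skill
  let p2 := (List.range rowCount).foldl (fun m x =>
      (List.range colCount).foldl (fun m y => madd m x (y + 1) (mget m x y)) m) p1
  let p3 := (List.range rowCount).foldl (fun m x =>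
      (List.range colCount).foldl (fun m y => madd m (x + 1) y (mget m x y)) m) p2
  let res := (List.range rowCount).foldl (fun st x =>
      (List.range colCount).foldl (fun (st : List (List Int) × Int) y =>
        let b := madd st.1 x y (mget p3 x y)
        (b, if 1 ≤ mget b x y then st.2 + 1 else st.2)) st) (board, 0)
  res.2

-- ===== PORT B =====
def applySkills (m : List (List Int)) (skills : List (List Int)) : List (List Int) :=
  skills.foldl (fun m s =>
    match s with
    | [t, r1, c1, r2, c2, degree] =>
        let d := if t == 2 then degree else -degree
        (PySem.List.pyRange r1 (r2 + 1) 1).foldl (fun m r =>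
          (PySem.List.pyRange c1 (c2 + 1) 1).foldl (fun m c => pyAdd2 m r c d) m) m
    | _ => m) m

def solution_alt (board : List (List Int)) (skill : List (List Int)) : Int :=
  let rows := board.length
  let cols := (PySem.List.pyGetD board 0 []).length   -- len(board[0]); raises on [] (excluded by Pre_)
  let b1 := applySkills board skill
  (List.range rows).foldl (fun a x =>
    (List.range cols).foldl (fun (a : Int) y => if 1 ≤ mget b1 x y then a + 1 else a) a) 0

-- ===== PRECONDITION & SPEC =====
def skillOK (R C : Int) (s : List Int) : Bool :=
  match s with
  | [t, r1, c1, r2, c2, degree] => decide (0 ≤ r1 ∧ r1 ≤ r2 ∧ r2 < R ∧ 0 ≤ c1 ∧ c1 ≤ c2 ∧ c2 < C)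
  | _ => false

-- Pre_ excludes empty boards and boards with a row shorter than board[0] (A raises IndexError
-- there), and skills that are not 6-tuples describing an in-range nonempty rectangle (A raises,
-- or returns accidental values via Python negative-index wraparound / the signed
-- difference-array identity on an empty rectangle).
def Pre_solution (board : List (List Int)) (skill : List (List Int)) : Prop :=
  board ≠ [] ∧ (∀ row ∈ board, (board.headD []).length ≤ row.length) ∧
    ∀ s ∈ skill, skillOK (board.length : Int) ((board.headD []).length : Int) s = true

instance (board : List (List Int)) (skill : List (List Int)) : Decidable (Pre_solution board skill) := by
  unfold Pre_solution; infer_instance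

def pvWitness_solution : List (List Int) × List (List Int) := ([[1, 0], [0, 2]], [[2, 0, 0, 1, 1, 1]])

def Spec_solution (board : List (List Int)) (skill : List (List Int)) (out : Int) : Prop := out = solution_alt board skill
instance (board : List (List Int)) (skill : List (List Int)) (out : Int) : Decidable (Spec_solution board skill out) := by unfold Spec_solution; infer_instance

-- ===== CLAIM (what is proved, stated in full; the proofs are below) =====
def Claim_equal_solution : Prop := ∀ (board : List (List Int)) (skill : List (List Int)), Dom_solution board skill → Pre_solution board skill → Spec_solution board skill (solution board skill)

-- ===== LEMMAS AND PROOFS =====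

-- shape: r rows, each of length c
def Sh (m : List (List Int)) (r c : Nat) : Prop := m.length = r ∧ ∀ row ∈ m, c ≤ row.length

-- per-skill contribution written by createPrefix into the padded difference board
def delta (s : List Int) (x y : Nat) : Int :=
  match s with
  | [t, r1, c1, r2, c2, degree] =>
      (if t == 2 then degree else -degree)
        * ((if (x : Int) = r1 then 1 else 0) - (if (x : Int) = r2 + 1 then 1 else 0))
        * ((if (y : Int) = c1 then 1 else 0) - (if (y : Int) = c2 + 1 then 1 else 0))
  | _ => 0

-- per-skill direct effect on a cell (what B adds)
def effB (s : List Int) (x y : Nat) : Int :=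
  match s with
  | [t, r1, c1, r2, c2, degree] =>
      if r1 ≤ (x : Int) ∧ (x : Int) ≤ r2 ∧ c1 ≤ (y : Int) ∧ (y : Int) ≤ c2 then
        (if t == 2 then degree else -degree) else 0
  | _ => 0

theorem sh_madd {m r c} (h : Sh m r c) (i j : Nat) (d : Int) : Sh (madd m i j d) r c := by
  obtain ⟨h1, h2⟩ := h
  refine ⟨by simp [madd, h1], ?_⟩
  intro row hrow
  obtain ⟨k, hk⟩ := List.mem_iff_getElem?.1 hrow
  rw [madd, List.getElem?_modify, Option.map_eq_map] at hk
  cases hm : m[k]? with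
  | none => rw [hm] at hk; simp at hk
  | some a =>
      have ha : a ∈ m := List.mem_of_getElem? hm
      rw [hm] at hk
      simp only [Option.map_some, Option.some.injEq] at hk
      subst hk
      split
      · rw [List.length_modify]; exact h2 _ ha
      · exact h2 _ ha

theorem pyAdd2_eq_madd {m : List (List Int)} {r c : Nat} (h : Sh m r c) {i j : Int}
    (hi0 : 0 ≤ i) (hir : i < (r : Int)) (hj0 : 0 ≤ j) (hjc : j < (c : Int)) (d : Int) :
    pyAdd2 m i j d = madd m i.toNat j.toNat d := by
  obtain ⟨h1, h2⟩ := h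
  have e1 : pyIx i m.length = i := if_neg (by omega)
  rw [pyAdd2, e1, if_pos ⟨hi0, by omega⟩, madd]
  apply List.ext_getElem?
  intro k
  rw [List.getElem?_modify, List.getElem?_modify]
  cases hm : m[k]? with
  | none => simp
  | some row =>
      have hrow : row ∈ m := List.mem_of_getElem? hm
      have hjr : pyIx j row.length = j := if_neg (by omega)
      simp only [Option.map_eq_map, Option.map_some, Option.some.injEq]
      by_cases hk : i.toNat = k
      · subst hk
        simp only [if_pos rfl]
        rw [hjr, if_pos (show 0 ≤ j ∧ j < (row.length : Int) from
          ⟨hj0, by have := h2 _ hrow; omega⟩)]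
      · simp [hk]

theorem sh_pyAdd2 {m r c} (h : Sh m r c) (i j : Int) (d : Int) : Sh (pyAdd2 m i j d) r c := by
  obtain ⟨h1, h2⟩ := h
  rw [pyAdd2]
  split
  · refine ⟨by simp [h1], ?_⟩
    intro row hrow
    obtain ⟨k, hk⟩ := List.mem_iff_getElem?.1 hrow
    rw [List.getElem?_modify, Option.map_eq_map] at hk
    cases hm : m[k]? with
    | none => rw [hm] at hk; simp at hk
    | some a =>
        have ha : a ∈ m := List.mem_of_getElem? hm
        rw [hm] at hk
        simp only [Option.map_some, Option.some.injEq] at hk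
        subst hk
        split
        · split
          · rw [List.length_modify]; exact h2 _ ha
          · exact h2 _ ha
        · exact h2 _ ha
  · exact ⟨h1, h2⟩

theorem skillOK_elim {R C : Int} {s : List Int} (hs : skillOK R C s = true) :
    ∃ t r1 c1 r2 c2 degree, s = [t, r1, c1, r2, c2, degree] ∧
      0 ≤ r1 ∧ r1 ≤ r2 ∧ r2 < R ∧ 0 ≤ c1 ∧ c1 ≤ c2 ∧ c2 < C := by
  unfold skillOK at hs
  split at hs
  · next t r1 c1 r2 c2 degree =>
      exact ⟨t, r1, c1, r2, c2, degree, rfl, by simpa using hs⟩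
  · simp at hs

theorem mget_madd {m r c} (h : Sh m r c) {i j : Nat} (hi : i < r) (hj : j < c) (d : Int) (x y : Nat) :
    mget (madd m i j d) x y = mget m x y + (if x = i ∧ y = j then d else 0) := by
  obtain ⟨h1, h2⟩ := h
  simp only [mget, madd, List.getD_eq_getElem?_getD, List.getElem?_modify, Option.map_eq_map]
  cases hm : m[x]? with
  | none =>
      have hx : ¬ x = i := by
        intro hxi; subst hxi
        rw [List.getElem?_eq_none_iff] at hm; omega
      simp [hx, fun hc : x = i ∧ y = j => hx hc.1]
  | some row =>
      have hrow : row ∈ m := List.mem_of_getElem? hm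
      have hjr : j < row.length := lt_of_lt_of_le hj (h2 _ hrow)
      by_cases hx : x = i
      · subst hx
        simp only [if_pos rfl, Option.map_some, Option.getD_some, List.getElem?_modify,
          Option.map_eq_map, if_true, eq_self_iff_true, true_and]
        by_cases hy : y = j
        · subst hy
          simp [List.getElem?_eq_getElem hjr]
        · cases row[y]? <;> simp [hy] <;> (intro h'; exact absurd h'.symm hy)
      · have hne : ¬ i = x := fun h' => hx h'.symm
        simp [hm, hne, hx, fun hc : x = i ∧ y = j => hx hc.1]



-- per-skill contribution written by createPrefix into the padded difference board

theorem mget_zero_board (R C x y : Nat) :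
    mget ((List.range (R + 1)).map (fun _ => (List.range (C + 1)).map (fun _ => (0 : Int)))) x y = 0 := by
  simp only [mget, List.getD_eq_getElem?_getD, List.getElem?_map]
  cases h : (List.range (R + 1))[x]? <;> simp

theorem sh_zero_board (R C : Nat) :
    Sh ((List.range (R + 1)).map (fun _ => (List.range (C + 1)).map (fun _ => (0 : Int)))) (R + 1) (C + 1) := by
  constructor
  · simp
  · intro row hrow
    simp only [List.mem_map] at hrow
    obtain ⟨_, _, rfl⟩ := hrow
    simp

theorem ind_sum (a : Int) (n : Nat) :
    (∑ i ∈ Finset.range n, if (i : Int) = a then (1 : Int) else 0) =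
      if 0 ≤ a ∧ a < (n : Int) then 1 else 0 := by
  induction n with
  | zero =>
      simp only [Finset.range_zero, Finset.sum_empty]
      rw [eq_comm, if_neg]
      omega
  | succ n ih =>
      rw [Finset.sum_range_succ, ih]
      split_ifs <;> push_cast at * <;> omega

theorem sum_swap_list (skills : List (List Int)) (f : List Int → Nat → Nat → Int) (x y : Nat) :
    (∑ i ∈ Finset.range (x + 1), ∑ j ∈ Finset.range (y + 1),
        (skills.map (fun s => f s i j)).sum) =
      (skills.map (fun s => ∑ i ∈ Finset.range (x + 1), ∑ j ∈ Finset.range (y + 1), f s i j)).sum := by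
  induction skills with
  | nil => simp
  | cons s rest ih => simp [Finset.sum_add_distrib, ih]

theorem cnt1 (b1 : List (List Int)) (x : Nat) (k : Nat) (a : Int) :
    (List.range k).foldl (fun (a : Int) y => if 1 ≤ mget b1 x y then a + 1 else a) a =
      a + ∑ y ∈ Finset.range k, (if 1 ≤ mget b1 x y then (1 : Int) else 0) := by
  induction k with
  | zero => simp
  | succ k ih =>
      rw [List.range_succ, List.foldl_append, List.foldl_cons, List.foldl_nil, ih,
        Finset.sum_range_succ]
      split_ifs <;> ring

theorem cnt2 (b1 : List (List Int)) (C : Nat) (k : Nat) (a : Int) :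
    (List.range k).foldl (fun (a : Int) x =>
      (List.range C).foldl (fun (a : Int) y => if 1 ≤ mget b1 x y then a + 1 else a) a) a =
      a + ∑ x ∈ Finset.range k, ∑ y ∈ Finset.range C, (if 1 ≤ mget b1 x y then (1 : Int) else 0) := by
  induction k with
  | zero => simp
  | succ k ih =>
      rw [List.range_succ, List.foldl_append, List.foldl_cons, List.foldl_nil, ih,
        cnt1, Finset.sum_range_succ]
      ring


set_option maxHeartbeats 1000000 in
theorem createPrefix_mget {R C : Nat} (skills : List (List Int))
    (hsk : ∀ s ∈ skills, skillOK (R : Int) (C : Int) s = true) :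
    ∀ m, Sh m (R + 1) (C + 1) → ∀ x y,
      mget (createPrefix m skills) x y = mget m x y + (skills.map (fun s => delta s x y)).sum := by
  induction skills with
  | nil => intro m hm x y; simp [createPrefix]
  | cons s rest ih =>
      intro m hm x y
      obtain ⟨t, r1, c1, r2, c2, degree, rfl, hr1, hr12, hr2, hc1, hc12, hc2⟩ :=
        skillOK_elim (hsk s List.mem_cons_self)
      have hrest : ∀ s ∈ rest, skillOK (R : Int) (C : Int) s = true :=
        fun s hs => hsk s (List.mem_cons_of_mem _ hs)
      have step_eq : ∀ m', Sh m' (R + 1) (C + 1) →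
          mget (pyAdd2 (pyAdd2 (pyAdd2 (pyAdd2 m' r1 c1 (if t == 2 then degree else -degree)) r1 (c2 + 1)
              (-(if t == 2 then degree else -degree))) (r2 + 1) c1
              (-(if t == 2 then degree else -degree))) (r2 + 1) (c2 + 1)
              (if t == 2 then degree else -degree)) x y =
            mget m' x y + delta [t, r1, c1, r2, c2, degree] x y := by
        intro m' hm'
        rw [pyAdd2_eq_madd (sh_pyAdd2 (sh_pyAdd2 (sh_pyAdd2 hm' _ _ _) _ _ _) _ _ _)
            (by omega) (by omega) (by omega) (by omega),
          pyAdd2_eq_madd (sh_pyAdd2 (sh_pyAdd2 hm' _ _ _) _ _ _)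
            (by omega) (by omega) (by omega) (by omega),
          pyAdd2_eq_madd (sh_pyAdd2 hm' _ _ _) (by omega) (by omega) (by omega) (by omega),
          pyAdd2_eq_madd hm' (by omega) (by omega) (by omega) (by omega)]
        rw [mget_madd (sh_madd (sh_madd (sh_madd hm' _ _ _) _ _ _) _ _ _) (by omega) (by omega),
          mget_madd (sh_madd (sh_madd hm' _ _ _) _ _ _) (by omega) (by omega),
          mget_madd (sh_madd hm' _ _ _) (by omega) (by omega),
          mget_madd hm' (by omega) (by omega)]
        have e1 : (x = r1.toNat) = ((x : Int) = r1) := propext (by omega)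
        have e2 : (x = (r2 + 1).toNat) = ((x : Int) = r2 + 1) := propext (by omega)
        have e3 : (y = c1.toNat) = ((y : Int) = c1) := propext (by omega)
        have e4 : (y = (c2 + 1).toNat) = ((y : Int) = c2 + 1) := propext (by omega)
        simp only [delta, e1, e2, e3, e4]
        split_ifs <;> (first | ring1 | omega)
      calc mget (createPrefix m ([t, r1, c1, r2, c2, degree] :: rest)) x y
          = mget m x y + delta [t, r1, c1, r2, c2, degree] x y +
              (rest.map (fun s => delta s x y)).sum := by
            have unfold1 : createPrefix m ([t, r1, c1, r2, c2, degree] :: rest) =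
                createPrefix (pyAdd2 (pyAdd2 (pyAdd2 (pyAdd2 m r1 c1
                    (if t == 2 then degree else -degree)) r1 (c2 + 1)
                    (-(if t == 2 then degree else -degree))) (r2 + 1) c1
                    (-(if t == 2 then degree else -degree))) (r2 + 1) (c2 + 1)
                    (if t == 2 then degree else -degree)) rest := rfl
            rw [unfold1, ih hrest _ ?_ x y, step_eq m hm]
            exact sh_pyAdd2 (sh_pyAdd2 (sh_pyAdd2 (sh_pyAdd2 hm _ _ _) _ _ _) _ _ _) _ _ _
        _ = mget m x y + (([t, r1, c1, r2, c2, degree] :: rest).map (fun s => delta s x y)).sum := by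
            simp [add_assoc]

theorem sh_createPrefix (skills : List (List Int)) {m r c} (h : Sh m r c) :
    Sh (createPrefix m skills) r c := by
  induction skills generalizing m with
  | nil => exact h
  | cons s rest ih =>
      have e : createPrefix m (s :: rest) = createPrefix
          ((fun m s => match s with
            | [t, r1, c1, r2, c2, degree] =>
                let d := if t == 2 then degree else -degree
                pyAdd2 (pyAdd2 (pyAdd2 (pyAdd2 m r1 c1 d) r1 (c2 + 1) (-d)) (r2 + 1) c1 (-d)) (r2 + 1) (c2 + 1) d
            | _ => m) m s) rest := rfl
      rw [e]
      refine ih ?_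
      rcases s with _ | ⟨t, s⟩; · exact h
      rcases s with _ | ⟨r1, s⟩; · exact h
      rcases s with _ | ⟨c1, s⟩; · exact h
      rcases s with _ | ⟨r2, s⟩; · exact h
      rcases s with _ | ⟨c2, s⟩; · exact h
      rcases s with _ | ⟨dg, s⟩; · exact h
      rcases s with _ | ⟨z, s⟩
      · exact sh_pyAdd2 (sh_pyAdd2 (sh_pyAdd2 (sh_pyAdd2 h _ _ _) _ _ _) _ _ _) _ _ _
      · exact h

theorem rowInner {R C : Nat} (x : Nat) (hx : x < R) :
    ∀ k ≤ C, ∀ m, Sh m (R + 1) (C + 1) →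
      (∀ u v, mget ((List.range k).foldl (fun m y => madd m x (y + 1) (mget m x y)) m) u v =
        if u = x ∧ 1 ≤ v ∧ v ≤ k then ∑ j ∈ Finset.range (v + 1), mget m x j else mget m u v) ∧
      Sh ((List.range k).foldl (fun m y => madd m x (y + 1) (mget m x y)) m) (R + 1) (C + 1) := by
  intro k
  induction k with
  | zero =>
      intro _ m hm
      refine ⟨fun u v => ?_, hm⟩
      rw [List.range_zero, List.foldl_nil, if_neg (by omega)]
  | succ k ih =>
      intro hk m hm
      obtain ⟨ihg, ihs⟩ := ih (by omega) m hm
      rw [List.range_succ, List.foldl_append, List.foldl_cons, List.foldl_nil]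
      set m' := (List.range k).foldl (fun m y => madd m x (y + 1) (mget m x y)) m with hm'
      have hmx : mget m' x k = ∑ j ∈ Finset.range (k + 1), mget m x j := by
        rw [ihg x k]
        rcases Nat.eq_zero_or_pos k with h0 | h0
        · subst h0; simp [Finset.sum_range_succ]
        · rw [if_pos ⟨rfl, h0, le_refl k⟩]
      constructor
      · intro u v
        rw [mget_madd ihs (by omega) (by omega), ihg u v, hmx]
        by_cases hu : u = x
        · subst hu
          by_cases hv : v = k + 1
          · subst hv
            rw [if_neg (by omega), if_pos (by omega), if_pos (by omega)]
            conv_rhs => rw [Finset.sum_range_succ]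
            ring
          · by_cases h1 : 1 ≤ v ∧ v ≤ k
            · rw [if_pos (by omega), if_neg (by omega), if_pos (by omega)]; ring
            · rw [if_neg (by omega), if_neg (by omega), if_neg (by omega)]; ring
        · rw [if_neg (by simp [hu]), if_neg (by simp [hu]), if_neg (by simp [hu])]; ring
      · exact sh_madd ihs _ _ _

theorem rowPass {R C : Nat} :
    ∀ k ≤ R, ∀ m, Sh m (R + 1) (C + 1) →
      (∀ u v, mget ((List.range k).foldl (fun m x =>
          (List.range C).foldl (fun m y => madd m x (y + 1) (mget m x y)) m) m) u v =
        if u < k ∧ 1 ≤ v ∧ v ≤ C then ∑ j ∈ Finset.range (v + 1), mget m u j else mget m u v) ∧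
      Sh ((List.range k).foldl (fun m x =>
          (List.range C).foldl (fun m y => madd m x (y + 1) (mget m x y)) m) m) (R + 1) (C + 1) := by
  intro k
  induction k with
  | zero =>
      intro _ m hm
      exact ⟨fun u v => by rw [List.range_zero, List.foldl_nil, if_neg (by omega)], by
        rw [List.range_zero, List.foldl_nil]; exact hm⟩
  | succ k ih =>
      intro hk m hm
      obtain ⟨ihg, ihs⟩ := ih (by omega) m hm
      rw [List.range_succ, List.foldl_append, List.foldl_cons, List.foldl_nil]
      set M := (List.range k).foldl (fun m x =>
          (List.range C).foldl (fun m y => madd m x (y + 1) (mget m x y)) m) m with hM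
      obtain ⟨ing, ins⟩ := rowInner (R := R) (C := C) k (by omega) C (le_refl C) M ihs
      refine ⟨fun u v => ?_, ins⟩
      rw [ing u v]
      by_cases hu : u = k
      · subst hu
        by_cases hv : 1 ≤ v ∧ v ≤ C
        · rw [if_pos ⟨rfl, hv.1, hv.2⟩, if_pos (by omega)]
          refine Finset.sum_congr rfl (fun j hj => ?_)
          rw [ihg u j, if_neg (by omega)]
        · rw [if_neg (by tauto), ihg u v, if_neg (by omega), if_neg (by omega)]
      · rw [if_neg (by tauto), ihg u v]
        by_cases h2 : u < k ∧ 1 ≤ v ∧ v ≤ C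
        · rw [if_pos h2, if_pos (by omega)]
        · rw [if_neg h2, if_neg (by omega)]

theorem colInner {R C : Nat} (x : Nat) (hx : x < R) :
    ∀ k ≤ C, ∀ m, Sh m (R + 1) (C + 1) →
      (∀ u v, mget ((List.range k).foldl (fun m y => madd m (x + 1) y (mget m x y)) m) u v =
        mget m u v + (if u = x + 1 ∧ v < k then mget m x v else 0)) ∧
      Sh ((List.range k).foldl (fun m y => madd m (x + 1) y (mget m x y)) m) (R + 1) (C + 1) := by
  intro k
  induction k with
  | zero =>
      intro _ m hm
      exact ⟨fun u v => by rw [List.range_zero, List.foldl_nil, if_neg (by omega)]; ring, by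
        rw [List.range_zero, List.foldl_nil]; exact hm⟩
  | succ k ih =>
      intro hk m hm
      obtain ⟨ihg, ihs⟩ := ih (by omega) m hm
      rw [List.range_succ, List.foldl_append, List.foldl_cons, List.foldl_nil]
      set M := (List.range k).foldl (fun m y => madd m (x + 1) y (mget m x y)) m with hM
      have hMx : ∀ v, mget M x v = mget m x v := fun v => by
        rw [ihg x v, if_neg (by omega)]; ring
      refine ⟨fun u v => ?_, sh_madd ihs _ _ _⟩
      rw [mget_madd ihs (by omega) (by omega), ihg u v, hMx k]
      by_cases hu : u = x + 1
      · subst hu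
        by_cases hv : v = k
        · subst hv
          rw [if_neg (by omega), if_pos (by omega), if_pos (by omega)]; ring
        · by_cases h2 : v < k
          · rw [if_pos (by omega), if_neg (by omega), if_pos (by omega)]; ring
          · rw [if_neg (by omega), if_neg (by omega), if_neg (by omega)]; ring
      · rw [if_neg (by tauto), if_neg (by tauto), if_neg (by tauto)]; ring

theorem colPass {R C : Nat} :
    ∀ k ≤ R, ∀ m, Sh m (R + 1) (C + 1) →
      (∀ u v, mget ((List.range k).foldl (fun m x =>
          (List.range C).foldl (fun m y => madd m (x + 1) y (mget m x y)) m) m) u v =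
        if 1 ≤ u ∧ u ≤ k ∧ v < C then ∑ i ∈ Finset.range (u + 1), mget m i v else mget m u v) ∧
      Sh ((List.range k).foldl (fun m x =>
          (List.range C).foldl (fun m y => madd m (x + 1) y (mget m x y)) m) m) (R + 1) (C + 1) := by
  intro k
  induction k with
  | zero =>
      intro _ m hm
      exact ⟨fun u v => by rw [List.range_zero, List.foldl_nil, if_neg (by omega)], by
        rw [List.range_zero, List.foldl_nil]; exact hm⟩
  | succ k ih =>
      intro hk m hm
      obtain ⟨ihg, ihs⟩ := ih (by omega) m hm
      rw [List.range_succ, List.foldl_append, List.foldl_cons, List.foldl_nil]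
      set M := (List.range k).foldl (fun m x =>
          (List.range C).foldl (fun m y => madd m (x + 1) y (mget m x y)) m) m with hM
      obtain ⟨ing, ins⟩ := colInner (R := R) (C := C) k (by omega) C (le_refl C) M ihs
      have hMk : ∀ v, v < C → mget M k v = ∑ i ∈ Finset.range (k + 1), mget m i v := by
        intro v hv
        rw [ihg k v]
        rcases Nat.eq_zero_or_pos k with h0 | h0
        · subst h0; rw [if_neg (by omega)]; simp
        · rw [if_pos (by omega)]
      refine ⟨fun u v => ?_, ins⟩
      rw [ing u v, ihg u v]
      by_cases hu : u = k + 1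
      · subst hu
        by_cases hv : v < C
        · rw [if_neg (by omega), if_pos (by omega), if_pos (by omega), hMk v hv]
          conv_rhs => rw [Finset.sum_range_succ]
          ring
        · rw [if_neg (by omega), if_neg (by tauto), if_neg (by tauto)]; ring
      · by_cases h2 : 1 ≤ u ∧ u ≤ k ∧ v < C
        · rw [if_pos h2, if_neg (by tauto), if_pos (by omega)]; ring
        · rw [if_neg h2, if_neg (by tauto), if_neg (by omega)]; ring

theorem ansInner {R C : Nat} (P : List (List Int)) (x : Nat) (hx : x < R) :
    ∀ k ≤ C, ∀ (b : List (List Int)) (acc : Int), Sh b R C →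
      (((List.range k).foldl (fun (st : List (List Int) × Int) y =>
          (madd st.1 x y (mget P x y),
            if 1 ≤ mget (madd st.1 x y (mget P x y)) x y then st.2 + 1 else st.2)) (b, acc)).2 =
        acc + ∑ y ∈ Finset.range k, (if 1 ≤ mget b x y + mget P x y then (1 : Int) else 0)) ∧
      (∀ u v, u ≠ x ∨ k ≤ v →
        mget ((List.range k).foldl (fun (st : List (List Int) × Int) y =>
          (madd st.1 x y (mget P x y),
            if 1 ≤ mget (madd st.1 x y (mget P x y)) x y then st.2 + 1 else st.2)) (b, acc)).1 u v =
          mget b u v) ∧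
      Sh ((List.range k).foldl (fun (st : List (List Int) × Int) y =>
          (madd st.1 x y (mget P x y),
            if 1 ≤ mget (madd st.1 x y (mget P x y)) x y then st.2 + 1 else st.2)) (b, acc)).1 R C := by
  intro k
  induction k with
  | zero =>
      intro _ b acc hb
      exact ⟨by simp, fun u v _ => by simp, by simpa using hb⟩
  | succ k ih =>
      intro hk b acc hb
      obtain ⟨ih2, ih1, ihs⟩ := ih (by omega) b acc hb
      rw [List.range_succ, List.foldl_append, List.foldl_cons, List.foldl_nil]
      set st := (List.range k).foldl (fun (st : List (List Int) × Int) y =>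
          (madd st.1 x y (mget P x y),
            if 1 ≤ mget (madd st.1 x y (mget P x y)) x y then st.2 + 1 else st.2)) (b, acc) with hst
      have hcell : mget st.1 x k = mget b x k := ih1 x k (Or.inr (le_refl k))
      have hnew : mget (madd st.1 x k (mget P x k)) x k = mget b x k + mget P x k := by
        rw [mget_madd ihs (by omega) (by omega), hcell, if_pos ⟨rfl, rfl⟩]
      refine ⟨?_, fun u v huv => ?_, sh_madd ihs _ _ _⟩
      · rw [Finset.sum_range_succ, hnew, ih2]
        split_ifs <;> ring
      · rw [mget_madd ihs (by omega) (by omega), if_neg (by omega), ih1 u v (by omega)]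
        ring

theorem ansOuter {R C : Nat} (P : List (List Int)) :
    ∀ k ≤ R, ∀ (b : List (List Int)) (acc : Int), Sh b R C →
      (((List.range k).foldl (fun st x => (List.range C).foldl
          (fun (st : List (List Int) × Int) y =>
            (madd st.1 x y (mget P x y),
              if 1 ≤ mget (madd st.1 x y (mget P x y)) x y then st.2 + 1 else st.2)) st) (b, acc)).2 =
        acc + ∑ x ∈ Finset.range k, ∑ y ∈ Finset.range C,
          (if 1 ≤ mget b x y + mget P x y then (1 : Int) else 0)) ∧
      (∀ u v, k ≤ u →
        mget ((List.range k).foldl (fun st x => (List.range C).foldl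
          (fun (st : List (List Int) × Int) y =>
            (madd st.1 x y (mget P x y),
              if 1 ≤ mget (madd st.1 x y (mget P x y)) x y then st.2 + 1 else st.2)) st) (b, acc)).1 u v =
          mget b u v) ∧
      Sh ((List.range k).foldl (fun st x => (List.range C).foldl
          (fun (st : List (List Int) × Int) y =>
            (madd st.1 x y (mget P x y),
              if 1 ≤ mget (madd st.1 x y (mget P x y)) x y then st.2 + 1 else st.2)) st) (b, acc)).1 R C := by
  intro k
  induction k with
  | zero =>
      intro _ b acc hb
      exact ⟨by simp, fun u v _ => by simp, by simpa using hb⟩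
  | succ k ih =>
      intro hk b acc hb
      obtain ⟨ih2, ih1, ihs⟩ := ih (by omega) b acc hb
      rw [List.range_succ, List.foldl_append, List.foldl_cons, List.foldl_nil]
      set st := (List.range k).foldl (fun st x => (List.range C).foldl
          (fun (st : List (List Int) × Int) y =>
            (madd st.1 x y (mget P x y),
              if 1 ≤ mget (madd st.1 x y (mget P x y)) x y then st.2 + 1 else st.2)) st) (b, acc) with hst
      obtain ⟨in2, in1, ins⟩ := ansInner (R := R) (C := C) P k (by omega) C (le_refl C) st.1 st.2 ihs
      refine ⟨?_, fun u v hu => ?_, ins⟩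
      · refine in2.trans ?_
        have hrow : (∑ y ∈ Finset.range C, (if 1 ≤ mget st.1 k y + mget P k y then (1 : Int) else 0)) =
            ∑ y ∈ Finset.range C, (if 1 ≤ mget b k y + mget P k y then (1 : Int) else 0) :=
          Finset.sum_congr rfl (fun y _ => by rw [ih1 k y (le_refl k)])
        rw [hrow, ih2, Finset.sum_range_succ, add_assoc]
      · exact (in1 u v (Or.inl (by omega))).trans (ih1 u v (by omega))

theorem rectCols {R C : Nat} (i d : Int) (hi0 : 0 ≤ i) (hiR : i < (R : Int)) :
    ∀ (n : Nat) (a b : Int), 0 ≤ a → b ≤ (C : Int) → (b - a).toNat = n →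
      ∀ m, Sh m R C →
      (∀ x y, mget ((PySem.List.pyRange a b 1).foldl (fun m c => pyAdd2 m i c d) m) x y =
        mget m x y + (if (x : Int) = i ∧ a ≤ (y : Int) ∧ (y : Int) < b then d else 0)) ∧
      Sh ((PySem.List.pyRange a b 1).foldl (fun m c => pyAdd2 m i c d) m) R C := by
  intro n
  induction n with
  | zero =>
      intro a b ha hb hn m hm
      rw [PySem.List.pyRange_one_eq_nil (by omega)]
      exact ⟨fun x y => by rw [List.foldl_nil, if_neg (by omega)]; ring, hm⟩
  | succ n ih =>
      intro a b ha hb hn m hm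
      rw [PySem.List.pyRange_one_cons (by omega), List.foldl_cons,
        pyAdd2_eq_madd hm hi0 hiR ha (by omega) d]
      have hm' := sh_madd hm i.toNat a.toNat d
      obtain ⟨ihg, ihs⟩ := ih (a + 1) b (by omega) hb (by omega) _ hm'
      refine ⟨fun x y => ?_, ihs⟩
      rw [ihg x y, mget_madd hm (by omega) (by omega)]
      by_cases h1 : (x : Int) = i ∧ (y : Int) = a
      · rw [if_pos (by omega), if_neg (by omega), if_pos (by omega)]; ring
      · rw [if_neg (by omega)]
        by_cases h2 : (x : Int) = i ∧ a + 1 ≤ (y : Int) ∧ (y : Int) < b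
        · rw [if_pos h2, if_pos (by omega)]; ring
        · rw [if_neg h2, if_neg (by omega)]; ring

theorem rectRows {R C : Nat} (d c1 c2 : Int) (hc1 : 0 ≤ c1) (hc2 : c2 < (C : Int)) :
    ∀ (n : Nat) (a b : Int), 0 ≤ a → b ≤ (R : Int) → (b - a).toNat = n →
      ∀ m, Sh m R C →
      (∀ x y, mget ((PySem.List.pyRange a b 1).foldl (fun m r =>
          (PySem.List.pyRange c1 (c2 + 1) 1).foldl (fun m c => pyAdd2 m r c d) m) m) x y =
        mget m x y + (if a ≤ (x : Int) ∧ (x : Int) < b ∧ c1 ≤ (y : Int) ∧ (y : Int) ≤ c2 then d else 0)) ∧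
      Sh ((PySem.List.pyRange a b 1).foldl (fun m r =>
          (PySem.List.pyRange c1 (c2 + 1) 1).foldl (fun m c => pyAdd2 m r c d) m) m) R C := by
  intro n
  induction n with
  | zero =>
      intro a b ha hb hn m hm
      rw [show PySem.List.pyRange a b 1 = [] from PySem.List.pyRange_one_eq_nil (by omega)]
      exact ⟨fun x y => by rw [List.foldl_nil, if_neg (by omega)]; ring, hm⟩
  | succ n ih =>
      intro a b ha hb hn m hm
      rw [show PySem.List.pyRange a b 1 = a :: PySem.List.pyRange (a + 1) b 1 from
        PySem.List.pyRange_one_cons (by omega), List.foldl_cons]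
      obtain ⟨cg, cs⟩ := rectCols (R := R) (C := C) a d ha (by omega)
        (c2 + 1 - c1).toNat c1 (c2 + 1) hc1 (by omega) rfl m hm
      obtain ⟨ihg, ihs⟩ := ih (a + 1) b (by omega) hb (by omega) _ cs
      refine ⟨fun x y => ?_, ihs⟩
      rw [ihg x y, cg x y]
      by_cases h1 : (x : Int) = a ∧ c1 ≤ (y : Int) ∧ (y : Int) ≤ c2
      · rw [if_pos (by omega), if_neg (by omega), if_pos (by omega)]; ring
      · rw [if_neg (by omega)]
        by_cases h2 : a + 1 ≤ (x : Int) ∧ (x : Int) < b ∧ c1 ≤ (y : Int) ∧ (y : Int) ≤ c2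
        · rw [if_pos h2, if_pos (by omega)]; ring
        · rw [if_neg h2, if_neg (by omega)]; ring

theorem applySkills_mget {R C : Nat} (skills : List (List Int))
    (hsk : ∀ s ∈ skills, skillOK (R : Int) (C : Int) s = true) :
    ∀ m, Sh m R C → ∀ x y,
      mget (applySkills m skills) x y = mget m x y + (skills.map (fun s => effB s x y)).sum := by
  induction skills with
  | nil => intro m hm x y; simp [applySkills]
  | cons s rest ih =>
      intro m hm x y
      obtain ⟨t, r1, c1, r2, c2, degree, rfl, hr1, hr12, hr2, hc1, hc12, hc2⟩ :=
        skillOK_elim (hsk s List.mem_cons_self)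
      have hrest : ∀ s ∈ rest, skillOK (R : Int) (C : Int) s = true :=
        fun s hs => hsk s (List.mem_cons_of_mem _ hs)
      have e : applySkills m ([t, r1, c1, r2, c2, degree] :: rest) = applySkills
          ((PySem.List.pyRange r1 (r2 + 1) 1).foldl (fun m r =>
            (PySem.List.pyRange c1 (c2 + 1) 1).foldl (fun m c =>
              pyAdd2 m r c (if t == 2 then degree else -degree)) m) m) rest := rfl
      obtain ⟨rg, rs⟩ := rectRows (R := R) (C := C) (if t == 2 then degree else -degree) c1 c2 hc1
        (by omega) (r2 + 1 - r1).toNat r1 (r2 + 1) hr1 (by omega) rfl m hm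
      rw [e, ih hrest _ rs x y, rg x y, List.map_cons, List.sum_cons]
      have ec : (r1 ≤ (x : Int) ∧ (x : Int) < r2 + 1 ∧ c1 ≤ (y : Int) ∧ (y : Int) ≤ c2) =
          (r1 ≤ (x : Int) ∧ (x : Int) ≤ r2 ∧ c1 ≤ (y : Int) ∧ (y : Int) ≤ c2) := propext (by omega)
      simp only [effB, ec]
      ring

theorem delta_sum_eq_effB {R C : Nat} (s : List Int) (hs : skillOK (R : Int) (C : Int) s = true)
    (x y : Nat) :
    (∑ i ∈ Finset.range (x + 1), ∑ j ∈ Finset.range (y + 1), delta s i j) = effB s x y := by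
  obtain ⟨t, r1, c1, r2, c2, degree, rfl, hr1, hr12, hr2, hc1, hc12, hc2⟩ := skillOK_elim hs
  simp only [delta, effB]
  rw [← Finset.sum_mul_sum]
  have e1 : (∑ i ∈ Finset.range (x + 1),
      (if t == 2 then degree else -degree) * ((if (i : Int) = r1 then 1 else 0) - (if (i : Int) = r2 + 1 then 1 else 0))) =
      (if t == 2 then degree else -degree) *
        ((if 0 ≤ r1 ∧ r1 < ((x + 1 : Nat) : Int) then 1 else 0) -
         (if 0 ≤ r2 + 1 ∧ r2 + 1 < ((x + 1 : Nat) : Int) then 1 else 0)) := by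
    rw [← Finset.mul_sum]
    congr 1
    rw [Finset.sum_sub_distrib, ind_sum, ind_sum]
  have e2 : (∑ j ∈ Finset.range (y + 1),
      ((if (j : Int) = c1 then 1 else 0) - (if (j : Int) = c2 + 1 then (1 : Int) else 0))) =
      ((if 0 ≤ c1 ∧ c1 < ((y + 1 : Nat) : Int) then 1 else 0) -
       (if 0 ≤ c2 + 1 ∧ c2 + 1 < ((y + 1 : Nat) : Int) then 1 else 0)) := by
    rw [Finset.sum_sub_distrib, ind_sum, ind_sum]
  rw [e1, e2]
  push_cast
  split_ifs <;> (first | ring1 | omega)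

-- ===== VERDICT (by name: the statement is the Claim_ definition above) =====
theorem solution_spec : Claim_equal_solution := by
  intro board skill _ hpre
  obtain ⟨hne, hrows, hsk⟩ := hpre
  unfold Spec_solution
  have hCC : (PySem.List.pyGetD board 0 []).length = (board.headD []).length := by
    cases board with
    | nil => exact absurd rfl hne
    | cons r rest => rw [PySem.List.pyGetD_zero_cons, List.headD_cons]
  have hShB : Sh board board.length (board.headD []).length := ⟨rfl, hrows⟩
  have hsk' : ∀ s ∈ skill,
      skillOK (board.length : Int) ((board.headD []).length : Int) s = true := hsk
  have hR0 : 0 < board.length := List.length_pos_iff.mpr hne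
  simp only [solution, hCC]
  set Z := (List.range (board.length + 1)).map
      (fun _ => (List.range ((board.headD []).length + 1)).map (fun _ => (0 : Int))) with hZdef
  set P1 := createPrefix Z skill with hP1def
  set P2 := (List.range board.length).foldl (fun m x =>
      (List.range (board.headD []).length).foldl (fun m y => madd m x (y + 1) (mget m x y)) m) P1
    with hP2def
  set P3 := (List.range board.length).foldl (fun m x =>
      (List.range (board.headD []).length).foldl (fun m y => madd m (x + 1) y (mget m x y)) m) P2
    with hP3def
  have hZs : Sh Z (board.length + 1) ((board.headD []).length + 1) := by
    rw [hZdef]; exact sh_zero_board _ _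
  have hZ0 : ∀ x y, mget Z x y = 0 := fun x y => by
    rw [hZdef]; exact mget_zero_board _ _ _ _
  have hP1s : Sh P1 (board.length + 1) ((board.headD []).length + 1) := by
    rw [hP1def]; exact sh_createPrefix skill hZs
  have hP1g : ∀ x y, mget P1 x y = (skill.map (fun s => delta s x y)).sum := by
    intro x y
    rw [hP1def, createPrefix_mget skill hsk' Z hZs x y, hZ0 x y, zero_add]
  obtain ⟨hP2g, hP2s⟩ := rowPass (R := board.length) (C := (board.headD []).length)
    board.length (le_refl _) P1 hP1s
  rw [← hP2def] at hP2g hP2s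
  obtain ⟨hP3g, hP3s⟩ := colPass (R := board.length) (C := (board.headD []).length)
    board.length (le_refl _) P2 hP2s
  rw [← hP3def] at hP3g hP3s
  have h2' : ∀ i, i < board.length → ∀ y, y < (board.headD []).length →
      mget P2 i y = ∑ j ∈ Finset.range (y + 1), (skill.map (fun s => delta s i j)).sum := by
    intro i hi y hy
    rw [hP2g i y]
    rcases Nat.eq_zero_or_pos y with h0 | h0
    · subst h0
      rw [if_neg (by omega), Finset.sum_range_one, hP1g i 0]
    · rw [if_pos ⟨hi, h0, by omega⟩]
      exact Finset.sum_congr rfl (fun j _ => hP1g i j)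
  have hP3' : ∀ x, x < board.length → ∀ y, y < (board.headD []).length →
      mget P3 x y = ∑ i ∈ Finset.range (x + 1), ∑ j ∈ Finset.range (y + 1),
        (skill.map (fun s => delta s i j)).sum := by
    intro x hx y hy
    rw [hP3g x y]
    rcases Nat.eq_zero_or_pos x with h0 | h0
    · subst h0
      rw [if_neg (by omega), Finset.sum_range_one]
      exact h2' 0 hR0 y hy
    · rw [if_pos ⟨h0, by omega, hy⟩]
      refine Finset.sum_congr rfl (fun i hi => ?_)
      exact h2' i (by have := Finset.mem_range.1 hi; omega) y hy
  rw [(ansOuter (R := board.length) (C := (board.headD []).length) P3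
    board.length (le_refl _) board 0 hShB).1]
  simp only [solution_alt, hCC]
  have hb1g : ∀ x y, mget (applySkills board skill) x y =
      mget board x y + (skill.map (fun s => effB s x y)).sum :=
    applySkills_mget skill hsk' board hShB
  rw [cnt2 (applySkills board skill) (board.headD []).length board.length 0, zero_add, zero_add]
  refine Finset.sum_congr rfl (fun x hx => Finset.sum_congr rfl (fun y hy => ?_))
  rw [hb1g x y, hP3' x (Finset.mem_range.1 hx) y (Finset.mem_range.1 hy),
    sum_swap_list skill delta x y,
    List.map_congr_left (fun s hs => delta_sum_eq_effB s (hsk' s hs) x y)]
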